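-- pv_equiv track=rewrite | github.com/ChriCheng/sentiment_classification | src/build_sst_phrase_dataset.py | extract_node_tokens
-- ===== SOURCE A (Python) =====
-- from collections import Counter, defaultdict
--
-- def normalize_token(tok: str) -> str:
--     mapping = {
--         "-LRB-": "(",
--         "-RRB-": ")",
--         "-LSB-": "[",
--         "-RSB-": "]",
--         "-LCB-": "{",
--         "-RCB-": "}",
--     }
--     return mapping.get(tok, tok)
--
-- def build_tree_children(parents):
--     children = defaultdict(list)
--     root = None
--     for child_idx, parent_idx in enumerate(parents, start=1):
--         if parent_idx == 0:
--             root = child_idx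
--         else:
--             children[parent_idx].append(child_idx)
--     if root is None:
--         raise ValueError("Root not found in STree.")
--     return children, root
--
-- def extract_node_tokens(tokens, parents):
--     n = len(tokens)
--     children, root = build_tree_children(parents)
--     cache = {}
--
--     def visit(node_idx):
--         if node_idx in cache:
--             return cache[node_idx]
--
--         if node_idx <= n:
--             raw_tokens = [tokens[node_idx - 1]]
--             norm_tokens = [normalize_token(tokens[node_idx - 1])]
--             first_leaf = node_idx
--             cache[node_idx] = (first_leaf, raw_tokens, norm_tokens)
--             return cache[node_idx]
--
--         child_infos = [visit(child) for child in children[node_idx]]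
--         child_infos.sort(key=lambda x: x[0])
--
--         raw_tokens = []
--         norm_tokens = []
--         first_leaf = child_infos[0][0]
--
--         for _, child_raw, child_norm in child_infos:
--             raw_tokens.extend(child_raw)
--             norm_tokens.extend(child_norm)
--
--         cache[node_idx] = (first_leaf, raw_tokens, norm_tokens)
--         return cache[node_idx]
--
--     for node_idx in range(1, len(parents) + 1):
--         visit(node_idx)
--
--     return cache, root
-- ===== SOURCE B (Python) =====
-- def normalize_token(tok: str) -> str:
--     mapping = {
--         "-LRB-": "(",
--         "-RRB-": ")",
--         "-LSB-": "[",
--         "-RSB-": "]",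
--         "-LCB-": "{",
--         "-RCB-": "}",
--     }
--     return mapping.get(tok, tok)
--
-- def extract_node_tokens(tokens, parents):
--     n = len(tokens)
--     children = {}
--     root = None
--     for child, parent in enumerate(parents, start=1):
--         if parent == 0:
--             root = child
--         else:
--             children.setdefault(parent, []).append(child)
--     if root is None:
--         raise ValueError("Root not found in STree.")
--
--     cache = {}
--     for start in range(1, len(parents) + 1):
--         stack = [start]
--         while stack:
--             node = stack.pop()
--             if node in cache:
--                 continue
--             if node <= n:
--                 tok = tokens[node - 1]
--                 cache[node] = (node, [tok], [normalize_token(tok)])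
--                 continue
--             kids = children.get(node, [])
--             pending = [c for c in kids if c not in cache]
--             if pending:
--                 stack.append(node)
--                 stack.extend(reversed(pending))
--                 continue
--             infos = sorted((cache[c] for c in kids), key=lambda info: info[0])
--             raw = [tok for info in infos for tok in info[1]]
--             norm = [tok for info in infos for tok in info[2]]
--             cache[node] = (infos[0][0], raw, norm)
--     return cache, root
-- ===== Notes on version B (the rewrite author's own statement) =====
-- stated objective: alternative
-- what changed: A computes each node's token lists by a memoized recursive visit; B replaces the recursion by an explicit-stack iterative DFS (push node back with its uncached children, combine when all children are cached); Pre_ excludes inputs where A raises (no root: ValueError; an internal node never used as a parent: IndexError) or recurses forever (cyclic parent chains).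
import Mathlib
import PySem

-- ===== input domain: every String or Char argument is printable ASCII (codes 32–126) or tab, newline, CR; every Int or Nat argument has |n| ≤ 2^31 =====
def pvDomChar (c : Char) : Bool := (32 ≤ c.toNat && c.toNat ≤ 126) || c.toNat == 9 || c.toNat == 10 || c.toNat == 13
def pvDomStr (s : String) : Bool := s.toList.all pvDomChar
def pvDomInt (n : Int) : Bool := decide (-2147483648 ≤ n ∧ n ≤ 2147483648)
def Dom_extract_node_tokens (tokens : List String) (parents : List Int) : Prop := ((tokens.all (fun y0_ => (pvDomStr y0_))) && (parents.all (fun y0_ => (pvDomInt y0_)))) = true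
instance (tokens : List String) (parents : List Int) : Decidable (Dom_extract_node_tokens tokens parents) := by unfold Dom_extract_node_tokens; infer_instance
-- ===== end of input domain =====

-- B replaces A's memoized recursive visit by an explicit-stack iterative DFS over the same
-- memo dict (objective: alternative control structure, same cost).

-- ===== PORT A =====

-- normalize_token (helper shared by both Pythons, ported once)
def pvNorm (tok : String) : String :=
  if tok = "-LRB-" then "(" else if tok = "-RRB-" then ")"
  else if tok = "-LSB-" then "[" else if tok = "-RSB-" then "]"
  else if tok = "-LCB-" then "{" else if tok = "-RCB-" then "}" else tok

abbrev pvVal := Int × List String × List String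

-- build_tree_children: one loop computing (children-dict, root); identical in A and B's Python,
-- ported once (defaultdict-append and setdefault-append both are insert (getD ++ [c])).
def pvBuild (parents : List Int) : PySem.Dict Int (List Int) × Option Int :=
  (PySem.List.enumerate parents 1).foldl
    (fun st p =>
      if p.2 = 0 then (st.1, some p.1)
      else (st.1.insert p.2 (st.1.getD p.2 [] ++ [p.1]), st.2))
    (PySem.Dict.empty, none)

-- A's visit(node): memoized recursion threading the cache.  The fuel argument only totalizes the
-- recursion (Python has none); under Pre_ fuel |parents|+2 is never exhausted (none = nontermination
-- or Python IndexError on child_infos[0] / tokens[node-1]).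
def pvVisitA (tokens : List String) (n : Int) (C : PySem.Dict Int (List Int)) :
    Nat → PySem.Dict Int pvVal → Int → Option (PySem.Dict Int pvVal × pvVal)
  | 0, _, _ => none
  | fuel+1, cache, v =>
    match cache.get? v with
    | some val => some (cache, val)
    | none =>
      if v ≤ n then
        match PySem.List.pyGet? tokens (v - 1) with
        | none => none
        | some t => some (cache.insert v (v, [t], [pvNorm t]), (v, [t], [pvNorm t]))
      else
        match (C.getD v []).foldlM
            (fun (acc : PySem.Dict Int pvVal × List pvVal) c =>
              (pvVisitA tokens n C fuel acc.1 c).map (fun r => (r.1, acc.2 ++ [r.2]))) (cache, []) with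
        | none => none
        | some acc =>
          let infos := PySem.List.sorted acc.2 (fun x => x.1) false
          match PySem.List.pyGet? infos 0 with
          | none => none
          | some h =>
            -- raw_tokens.extend / norm_tokens.extend loop
            let rn := infos.foldl (fun (rn : List String × List String) x =>
              (rn.1 ++ x.2.1, rn.2 ++ x.2.2)) ([], [])
            some (acc.1.insert v (h.1, rn.1, rn.2), (h.1, rn.1, rn.2))

def extract_node_tokens (tokens : List String) (parents : List Int) :
    (List (Int × Int × List String × List String)) × Int :=
  let n : Int := (tokens.length : Int)
  let br := pvBuild parents
  match br.2 with
  | none => ([], 0)   -- Python: raise ValueError (excluded by Pre_)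
  | some root =>
    match (PySem.List.pyRange 1 ((parents.length : Int) + 1)).foldlM
        (fun cache v => (pvVisitA tokens n br.1 (parents.length + 2) cache v).map (·.1))
        PySem.Dict.empty with
    | none => ([], root)   -- unreachable under Pre_
    | some cache => (cache.items, root)

-- ===== PORT B =====

-- One iteration of B's while loop.  Python pops from the END of its stack list; the Lean stack
-- list is kept top-first, so `stack.append(node); stack.extend(reversed(pending))` followed by
-- popping is `pending ++ node :: rest`.  none = Python IndexError/KeyError (excluded by Pre_).
def pvStepB (tokens : List String) (n : Int) (C : PySem.Dict Int (List Int))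
    (st : PySem.Dict Int pvVal × List Int) : Option (PySem.Dict Int pvVal × List Int) :=
  match st.2 with
  | [] => none
  | node :: rest =>
    if st.1.contains node then some (st.1, rest)
    else if node ≤ n then
      match PySem.List.pyGet? tokens (node - 1) with
      | none => none
      | some t => some (st.1.insert node (node, [t], [pvNorm t]), rest)
    else
      let kids := C.getD node []
      let pending := kids.filter (fun c => !(st.1.contains c))
      if pending.isEmpty then
        match kids.mapM st.1.get? with   -- infos generator: cache[c] for c in kids
        | none => none
        | some vals =>
          match PySem.List.sorted vals (fun x => x.1) false with
          | [] => none                   -- infos[0]: IndexError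
          | h :: restI =>
            some (st.1.insert node
              (h.1, (h :: restI).flatMap (fun x => x.2.1), (h :: restI).flatMap (fun x => x.2.2)),
              rest)
      else some (st.1, pending ++ node :: rest)

-- B's while loop, totalized by fuel (Python loops until the stack empties).
def pvLoopB (tokens : List String) (n : Int) (C : PySem.Dict Int (List Int)) :
    Nat → PySem.Dict Int pvVal × List Int → Option (PySem.Dict Int pvVal)
  | 0, st => if st.2.isEmpty then some st.1 else none
  | fuel+1, st =>
    if st.2.isEmpty then some st.1
    else
      match pvStepB tokens n C st with
      | none => none
      | some st' => pvLoopB tokens n C fuel st'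

def extract_node_tokens_alt (tokens : List String) (parents : List Int) :
    (List (Int × Int × List String × List String)) × Int :=
  let n : Int := (tokens.length : Int)
  let br := pvBuild parents
  match br.2 with
  | none => ([], 0)   -- Python: raise ValueError (excluded by Pre_)
  | some root =>
    match (PySem.List.pyRange 1 ((parents.length : Int) + 1)).foldlM
        (fun cache s => pvLoopB tokens n br.1 ((parents.length + 2)^(parents.length + 2)) (cache, [s]))
        PySem.Dict.empty with
    | none => ([], root)   -- fuel exhaustion: unreachable under Pre_
    | some cache => (cache.items, root)

-- ===== PRECONDITION & SPEC =====

def pvInternal (n m j : Int) : Bool := decide (1 ≤ j) && decide (j ≤ m) && decide (n < j)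

def pvStep (parents : List Int) (n : Int) (j : Int) : Int :=
  if pvInternal n (parents.length : Int) j then (PySem.List.pyGet? parents (j - 1)).getD 0 else 0

-- Pre_ = exactly the inputs on which the Python A returns: some parent is 0 (else ValueError),
-- every internal node n+1..m occurs as a parent (else IndexError on child_infos[0]), and the
-- parent chains between internal nodes leave the internal range within m steps, i.e. are acyclic
-- (else infinite recursion).
def Pre_extract_node_tokens (tokens : List String) (parents : List Int) : Prop :=
  (0 : Int) ∈ parents ∧
  (∀ j ∈ PySem.List.pyRange ((tokens.length : Int) + 1) ((parents.length : Int) + 1), j ∈ parents) ∧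
  (∀ j ∈ PySem.List.pyRange ((tokens.length : Int) + 1) ((parents.length : Int) + 1),
    pvInternal (tokens.length : Int) (parents.length : Int)
      ((pvStep parents (tokens.length : Int))^[parents.length] j) = false)

instance (tokens : List String) (parents : List Int) : Decidable (Pre_extract_node_tokens tokens parents) := by
  unfold Pre_extract_node_tokens; infer_instance

def pvWitness_extract_node_tokens : List String × List Int := (["a", "b"], [3, 3, 0])

def Spec_extract_node_tokens (tokens : List String) (parents : List Int) (out : (List (Int × Int × List String × List String)) × Int) : Prop := out = extract_node_tokens_alt tokens parents
instance (tokens : List String) (parents : List Int) (out : (List (Int × Int × List String × List String)) × Int) : Decidable (Spec_extract_node_tokens tokens parents out) := by unfold Spec_extract_node_tokens; infer_instance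

-- ===== CLAIM (what is proved, stated in full; the proofs are below) =====
def Claim_equal_extract_node_tokens : Prop := ∀ (tokens : List String) (parents : List Int), Dom_extract_node_tokens tokens parents → Pre_extract_node_tokens tokens parents → Spec_extract_node_tokens tokens parents (extract_node_tokens tokens parents)

-- ===== LEMMAS AND PROOFS =====

-- step-indexed runs of B's loop body, for the simulation proof
def pvIter (tokens : List String) (n : Int) (C : PySem.Dict Int (List Int)) :
    Nat → PySem.Dict Int pvVal × List Int → Option (PySem.Dict Int pvVal × List Int)
  | 0, st => some st
  | k+1, st =>
    match pvStepB tokens n C st with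
    | none => none
    | some st' => pvIter tokens n C k st'

theorem pvIter_trans {tokens : List String} {n : Int} {C : PySem.Dict Int (List Int)}
    {a b : Nat} {st st₁ st₂ : PySem.Dict Int pvVal × List Int}
    (h1 : pvIter tokens n C a st = some st₁) (h2 : pvIter tokens n C b st₁ = some st₂) :
    pvIter tokens n C (a + b) st = some st₂ := by
  induction a generalizing st with
  | zero => simp only [pvIter, Option.some.injEq] at h1; subst h1; simpa using h2
  | succ a ih =>
    rw [pvIter] at h1
    rcases hs : pvStepB tokens n C st with _ | st' <;> rw [hs] at h1
    · cases h1
    · have : a + 1 + b = (a + b) + 1 := by omega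
      rw [this, pvIter, hs]
      exact ih h1

theorem pvIter_one {tokens : List String} {n : Int} {C : PySem.Dict Int (List Int)}
    {st st' : PySem.Dict Int pvVal × List Int} (h : pvStepB tokens n C st = some st') :
    pvIter tokens n C 1 st = some st' := by
  rw [pvIter, h]; rfl

theorem pvLoop_of_iter {tokens : List String} {n : Int} {C : PySem.Dict Int (List Int)} :
    ∀ (k : Nat) (st : PySem.Dict Int pvVal × List Int) (d : PySem.Dict Int pvVal),
      pvIter tokens n C k st = some (d, []) → ∀ fuel, k ≤ fuel →
      pvLoopB tokens n C fuel st = some d := by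
  intro k
  induction k with
  | zero =>
    intro st d h fuel _
    simp only [pvIter, Option.some.injEq] at h; subst h
    cases fuel <;> simp [pvLoopB]
  | succ k ih =>
    intro st d h fuel hle
    rw [pvIter] at h
    rcases hs : pvStepB tokens n C st with _ | st' <;> rw [hs] at h
    · cases h
    · have hne : st.2 ≠ [] := by
        intro he
        rw [pvStepB] at hs
        rcases st with ⟨c, stk⟩
        simp at he; subst he; simp at hs
      rcases fuel with _ | f
      · omega
      · rw [pvLoopB, if_neg (by simpa [List.isEmpty_iff] using hne), hs]
        exact ih st' d h f (by omega)


def pvKf : PySem.Dict Int (List Int) → (Int × Int) → PySem.Dict Int (List Int) :=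
  fun d p => if p.2 = 0 then d else d.insert p.2 (d.getD p.2 [] ++ [p.1])
def pvRf : Option Int → (Int × Int) → Option Int :=
  fun r p => if p.2 = 0 then some p.1 else r

theorem pvBuild_eq (parents : List Int) :
    pvBuild parents = ((PySem.List.enumerate parents 1).foldl pvKf PySem.Dict.empty,
      (PySem.List.enumerate parents 1).foldl pvRf none) := by
  unfold pvBuild
  rw [show (fun (st : PySem.Dict Int (List Int) × Option Int) (p : Int × Int) =>
      if p.2 = 0 then (st.1, some p.1)
      else (st.1.insert p.2 (st.1.getD p.2 [] ++ [p.1]), st.2))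
    = (fun st p => (pvKf st.1 p, pvRf st.2 p)) from ?_]
  · rw [PySem.List.foldl_prod_mk]
  · funext st p; unfold pvKf pvRf; split <;> rfl

theorem pvChildren_getD (l : List (Int × Int)) (d : PySem.Dict Int (List Int)) (j : Int) :
    (l.foldl pvKf d).getD j [] =
      d.getD j [] ++ (if j = 0 then [] else (l.filter (fun p => p.2 == j)).map Prod.fst) := by
  induction l generalizing d with
  | nil => simp
  | cons p l ih =>
    simp only [List.foldl_cons, List.filter_cons]
    by_cases hp : p.2 = 0
    · have : pvKf d p = d := by unfold pvKf; simp [hp]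
      rw [this, ih]
      by_cases hj : j = 0
      · simp [hj]
      · have : (p.2 == j) = false := by simp [hp]; omega
        simp [hj, this]
    · have : pvKf d p = d.insert p.2 (d.getD p.2 [] ++ [p.1]) := by unfold pvKf; simp [hp]
      rw [this, ih]
      by_cases hj : j = p.2
      · have hj0 : ¬ (j = 0) := by omega
        simp [hj, hj0, PySem.Dict.getD_insert, hp]
      · rw [PySem.Dict.getD_insert]
        have : (p.2 == j) = false := by simp; omega
        simp [this, if_neg hj]

theorem pvRoot_none_iff (l : List (Int × Int)) (r : Option Int) :
    (l.foldl pvRf r = none) ↔ (r = none ∧ ∀ p ∈ l, p.2 ≠ 0) := by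
  induction l generalizing r with
  | nil => simp
  | cons p l ih =>
    simp only [List.foldl_cons]
    by_cases hp : p.2 = 0
    · have : pvRf r p = some p.1 := by unfold pvRf; simp [hp]
      rw [this, ih]
      simp [hp]
    · have : pvRf r p = r := by unfold pvRf; simp [hp]
      rw [this, ih]
      constructor
      · rintro ⟨h1, h2⟩; exact ⟨h1, by simpa [hp] using h2⟩
      · rintro ⟨h1, h2⟩; exact ⟨h1, fun q hq => h2 q (List.mem_cons_of_mem _ hq)⟩

theorem pvChild_mem {parents : List Int} {j c : Int}
    (h : c ∈ ((pvBuild parents).1).getD j []) :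
    1 ≤ c ∧ c ≤ (parents.length : Int) ∧ PySem.List.pyGet? parents (c - 1) = some j ∧ j ≠ 0 := by
  rw [pvBuild_eq] at h
  simp only [pvChildren_getD, PySem.Dict.getD_empty, List.nil_append] at h
  by_cases hj : j = 0
  · simp [hj] at h
  · rw [if_neg hj] at h
    simp only [List.mem_map, List.mem_filter] at h
    obtain ⟨p, ⟨hpm, hpj⟩, hpc⟩ := h
    rw [PySem.List.mem_enumerate_iff] at hpm
    obtain ⟨k, hk, rfl⟩ := hpm
    have hpj' : parents[k] = j := by simpa using hpj
    have hc : c = 1 + (k : Int) := by simpa using hpc.symm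
    subst hc
    refine ⟨by omega, by omega, ?_, hj⟩
    have h1 : 1 + (k : Int) - 1 = (k : Int) := by ring
    rw [h1, PySem.List.pyGet?_natCast, List.getElem?_eq_getElem hk, hpj']

theorem pvChild_ne_nil {parents : List Int} {j : Int} (hj0 : j ≠ 0) (hmem : j ∈ parents) :
    ((pvBuild parents).1).getD j [] ≠ [] := by
  rw [pvBuild_eq]
  simp only [pvChildren_getD, PySem.Dict.getD_empty, List.nil_append, if_neg hj0]
  obtain ⟨k, hk, hkj⟩ := List.mem_iff_getElem.mp hmem
  intro hnil
  have : (1 + (k : Int)) ∈ ((PySem.List.enumerate parents 1).filter (fun p => p.2 == j)).map Prod.fst := by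
    refine List.mem_map.mpr ⟨(1 + (k : Int), parents[k]), ?_, rfl⟩
    refine List.mem_filter.mpr ⟨?_, by simp [hkj]⟩
    rw [PySem.List.mem_enumerate_iff]
    exact ⟨k, hk, rfl⟩
  rw [hnil] at this; simp at this

theorem pvKids_len (parents : List Int) (j : Int) :
    (((pvBuild parents).1).getD j []).length ≤ parents.length := by
  rw [pvBuild_eq]
  simp only [pvChildren_getD, PySem.Dict.getD_empty, List.nil_append]
  by_cases hj : j = 0
  · simp [hj]
  · rw [if_neg hj, List.length_map]
    calc ((PySem.List.enumerate parents 1).filter (fun p => p.2 == j)).length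
        ≤ (PySem.List.enumerate parents 1).length := List.length_filter_le _ _
      _ = parents.length := PySem.List.length_enumerate _ _

theorem pvRoot_some {parents : List Int} (h : (0 : Int) ∈ parents) :
    ∃ r, (pvBuild parents).2 = some r := by
  rw [pvBuild_eq]
  rcases ho : (PySem.List.enumerate parents 1).foldl pvRf none with _ | r
  · exfalso
    obtain ⟨-, hall⟩ := (pvRoot_none_iff _ _).mp ho
    obtain ⟨k, hk, hkj⟩ := List.mem_iff_getElem.mp h
    exact hall (1 + (k : Int), parents[k])
      (by rw [PySem.List.mem_enumerate_iff]; exact ⟨k, hk, rfl⟩) (by simp [hkj])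
  · exact ⟨r, rfl⟩

-- generic Option-monad helpers
theorem pvMapM_of_forall₂ {α β : Type} {f : α → Option β} {l : List α} {ys : List β}
    (h : List.Forall₂ (fun a y => f a = some y) l ys) : l.mapM f = some ys := by
  induction h with
  | nil => simp
  | cons ha _ ih => rw [List.mapM_cons, ha, ih]; simp

theorem pvFoldlM_isSome {σ α : Type} (f : σ → α → Option σ) (l : List α)
    (h : ∀ a ∈ l, ∀ s, (f s a).isSome) : ∀ s, (l.foldlM f s).isSome := by
  induction l with
  | nil => intro s; simp
  | cons a l ih =>
    intro s
    rw [List.foldlM_cons]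
    rcases ha : f s a with _ | s'
    · have := h a (by simp) s; rw [ha] at this; simp at this
    · simpa using ih (fun b hb s'' => h b (by simp [hb]) s'') s'

-- number of parent-chain steps from j until the chain leaves the internal range
noncomputable def pvRank (parents : List Int) (n : Int) (j : Int) : Nat :=
  @dite Nat (∃ k, pvInternal n (parents.length : Int) ((pvStep parents n)^[k] j) = false)
    (Classical.propDecidable _) (fun h => Nat.find h) (fun _ => 0)

theorem pvRank_exists (parents : List Int) (n : Int)
    (hPre3 : ∀ j ∈ PySem.List.pyRange (n + 1) ((parents.length : Int) + 1),
      pvInternal n (parents.length : Int) ((pvStep parents n)^[parents.length] j) = false)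
    (j : Int) :
    ∃ k, pvInternal n (parents.length : Int) ((pvStep parents n)^[k] j) = false := by
  by_cases h : pvInternal n (parents.length : Int) j = false
  · exact ⟨0, by simpa using h⟩
  · have hj : pvInternal n (parents.length : Int) j = true := by
      cases hx : pvInternal n (parents.length : Int) j
      · exact absurd hx h
      · rfl
    have hj' : (1 ≤ j ∧ j ≤ (parents.length : Int)) ∧ n < j := by
      simpa [pvInternal] using hj
    exact ⟨parents.length, hPre3 j (PySem.List.mem_pyRange_one.mpr ⟨by omega, by omega⟩)⟩

theorem pvRank_escape (parents : List Int) (n : Int)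
    (hPre3 : ∀ j ∈ PySem.List.pyRange (n + 1) ((parents.length : Int) + 1),
      pvInternal n (parents.length : Int) ((pvStep parents n)^[parents.length] j) = false)
    (j : Int) :
    pvInternal n (parents.length : Int) ((pvStep parents n)^[pvRank parents n j] j) = false := by
  have hex := pvRank_exists parents n hPre3 j
  rw [pvRank, dif_pos hex]
  exact Nat.find_spec hex

theorem pvRank_le (parents : List Int) (n : Int)
    (hPre3 : ∀ j ∈ PySem.List.pyRange (n + 1) ((parents.length : Int) + 1),
      pvInternal n (parents.length : Int) ((pvStep parents n)^[parents.length] j) = false)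
    {j : Int} (hj : pvInternal n (parents.length : Int) j = true) :
    pvRank parents n j ≤ parents.length := by
  have hex := pvRank_exists parents n hPre3 j
  rw [pvRank, dif_pos hex]
  have hj' : (1 ≤ j ∧ j ≤ (parents.length : Int)) ∧ n < j := by simpa [pvInternal] using hj
  exact Nat.find_le (hPre3 j (PySem.List.mem_pyRange_one.mpr ⟨by omega, by omega⟩))

theorem pvRank_pos (parents : List Int) (n : Int)
    (hPre3 : ∀ j ∈ PySem.List.pyRange (n + 1) ((parents.length : Int) + 1),
      pvInternal n (parents.length : Int) ((pvStep parents n)^[parents.length] j) = false)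
    {j : Int} (hj : pvInternal n (parents.length : Int) j = true) :
    1 ≤ pvRank parents n j := by
  by_contra h
  have h0 : pvRank parents n j = 0 := by omega
  have := pvRank_escape parents n hPre3 j
  rw [h0] at this
  simp only [Function.iterate_zero, id] at this
  rw [hj] at this; cases this

theorem pvRank_child (parents : List Int) (n : Int)
    (hPre3 : ∀ j ∈ PySem.List.pyRange (n + 1) ((parents.length : Int) + 1),
      pvInternal n (parents.length : Int) ((pvStep parents n)^[parents.length] j) = false)
    {v c : Int} (hv : pvInternal n (parents.length : Int) v = true)
    (hc : pvInternal n (parents.length : Int) c = true)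
    (hstep : pvStep parents n c = v) :
    pvRank parents n c = pvRank parents n v + 1 := by
  have hchain : ∀ k, (pvStep parents n)^[k + 1] c = (pvStep parents n)^[k] v := by
    intro k; rw [Function.iterate_succ_apply, hstep]
  refine Nat.le_antisymm ?_ ?_
  · have hexc := pvRank_exists parents n hPre3 c
    rw [pvRank, dif_pos hexc]
    refine Nat.find_le ?_
    rw [hchain]
    exact pvRank_escape parents n hPre3 v
  · have h1 := pvRank_pos parents n hPre3 hc
    rcases hK : pvRank parents n c with _ | K
    · omega
    · have hesc := pvRank_escape parents n hPre3 c
      rw [hK, hchain] at hesc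
      have hexv := pvRank_exists parents n hPre3 v
      have : pvRank parents n v ≤ K := by
        rw [pvRank, dif_pos hexv]; exact Nat.find_le hesc
      omega

theorem pvLeafGet (tokens : List String) {v : Int} (h1 : 1 ≤ v) (h2 : v ≤ (tokens.length : Int)) :
    ∃ t, PySem.List.pyGet? tokens (v - 1) = some t := by
  rw [PySem.List.pyGet?_of_nonneg tokens (show (0:Int) ≤ v - 1 by omega)]
  exact ⟨tokens[(v - 1).toNat], List.getElem?_eq_getElem (by omega)⟩

theorem pvChildRank (parents : List Int) (n : Int)
    (hPre3 : ∀ j ∈ PySem.List.pyRange (n + 1) ((parents.length : Int) + 1),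
      pvInternal n (parents.length : Int) ((pvStep parents n)^[parents.length] j) = false)
    {v c : Int} (hvI : pvInternal n (parents.length : Int) v = true)
    (hmem : c ∈ ((pvBuild parents).1).getD v []) (hcn : n < c) :
    pvRank parents n c = pvRank parents n v + 1 := by
  obtain ⟨hc1, hcm, hget, -⟩ := pvChild_mem hmem
  have hcI : pvInternal n (parents.length : Int) c = true := by
    simp [pvInternal]; omega
  refine pvRank_child parents n hPre3 hvI hcI ?_
  rw [pvStep, if_pos hcI, hget]; rfl


-- A's child fold function, named for the proofs
def pvFA (tokens : List String) (n : Int) (C : PySem.Dict Int (List Int)) (f : Nat) :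
    PySem.Dict Int pvVal × List pvVal → Int → Option (PySem.Dict Int pvVal × List pvVal) :=
  fun acc c => (pvVisitA tokens n C f acc.1 c).map (fun r => (r.1, acc.2 ++ [r.2]))

theorem pvVisitA_succ (tokens : List String) (n : Int) (C : PySem.Dict Int (List Int))
    (f : Nat) (cache : PySem.Dict Int pvVal) (v : Int) :
    pvVisitA tokens n C (f+1) cache v =
      match cache.get? v with
      | some val => some (cache, val)
      | none =>
        if v ≤ n then
          match PySem.List.pyGet? tokens (v - 1) with
          | none => none
          | some t => some (cache.insert v (v, [t], [pvNorm t]), (v, [t], [pvNorm t]))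
        else
          match (C.getD v []).foldlM (pvFA tokens n C f) (cache, []) with
          | none => none
          | some acc =>
            match PySem.List.pyGet? (PySem.List.sorted acc.2 (fun x => x.1) false) 0 with
            | none => none
            | some h =>
              let rn := (PySem.List.sorted acc.2 (fun x => x.1) false).foldl
                (fun (rn : List String × List String) x => (rn.1 ++ x.2.1, rn.2 ++ x.2.2)) ([], [])
              some (acc.1.insert v (h.1, rn.1, rn.2), (h.1, rn.1, rn.2)) := rfl

-- the cache only grows through A's visit
theorem pvFoldA_grow_aux (tokens : List String) (n : Int) (C : PySem.Dict Int (List Int)) (f : Nat)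
    (H : ∀ (κ : PySem.Dict Int pvVal) (v : Int) (κ' : PySem.Dict Int pvVal) (val : pvVal),
      pvVisitA tokens n C f κ v = some (κ', val) →
      ∀ k w, κ.get? k = some w → κ'.get? k = some w) :
    ∀ (kids : List Int) (κ : PySem.Dict Int pvVal) (infos : List pvVal)
      (acc2 : PySem.Dict Int pvVal × List pvVal),
      kids.foldlM (pvFA tokens n C f) (κ, infos) = some acc2 →
      ∀ k w, κ.get? k = some w → acc2.1.get? k = some w := by
  intro kids
  induction kids with
  | nil => intro κ infos acc2 h k w hk; simp at h; rw [← h]; exact hk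
  | cons c kids ih =>
    intro κ infos acc2 h k w hk
    rw [List.foldlM_cons] at h
    rcases hc : pvVisitA tokens n C f κ c with _ | r
    · rw [pvFA, hc] at h; simp at h
    · have : pvFA tokens n C f (κ, infos) c = some (r.1, infos ++ [r.2]) := by rw [pvFA, hc]; rfl
      rw [this] at h
      replace h : kids.foldlM (pvFA tokens n C f) (r.1, infos ++ [r.2]) = some acc2 := h
      exact ih r.1 _ acc2 h k w (H κ c r.1 r.2 (by rw [hc]) k w hk)

theorem pvVisitA_grow (tokens : List String) (n : Int) (C : PySem.Dict Int (List Int)) :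
    ∀ (f : Nat) (κ : PySem.Dict Int pvVal) (v : Int) (κ' : PySem.Dict Int pvVal) (val : pvVal),
      pvVisitA tokens n C f κ v = some (κ', val) →
      ∀ k w, κ.get? k = some w → κ'.get? k = some w := by
  intro f
  induction f with
  | zero => intro κ v κ' val h; simp [pvVisitA] at h
  | succ f ih =>
    intro κ v κ' val h k w hk
    rw [pvVisitA_succ] at h
    split at h
    · cases h; exact hk
    · next hu =>
      split at h
      · split at h
        · cases h
        · cases h
          rw [PySem.Dict.get?_insert]
          split
          · next he => subst he; rw [hk] at hu; cases hu
          · exact hk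
      · split at h
        · cases h
        · next acc hacc =>
          split at h
          · cases h
          · cases h
            rw [PySem.Dict.get?_insert]
            split
            · next he => subst he; rw [hk] at hu; cases hu
            · exact pvFoldA_grow_aux tokens n C f ih _ κ [] acc hacc k w hk

theorem pvFoldA_grow (tokens : List String) (n : Int) (C : PySem.Dict Int (List Int)) (f : Nat) :
    ∀ (kids : List Int) (κ : PySem.Dict Int pvVal) (infos : List pvVal)
      (acc2 : PySem.Dict Int pvVal × List pvVal),
      kids.foldlM (pvFA tokens n C f) (κ, infos) = some acc2 →
      ∀ k w, κ.get? k = some w → acc2.1.get? k = some w :=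
  pvFoldA_grow_aux tokens n C f (pvVisitA_grow tokens n C f)

theorem pvVisitA_get_self {tokens : List String} {n : Int} {C : PySem.Dict Int (List Int)}
    {f : Nat} {κ : PySem.Dict Int pvVal} {v : Int} {κ' : PySem.Dict Int pvVal} {val : pvVal}
    (h : pvVisitA tokens n C f κ v = some (κ', val)) : κ'.get? v = some val := by
  rcases f with _ | f
  · simp [pvVisitA] at h
  · rw [pvVisitA_succ] at h
    split at h
    · next u hu => cases h; exact hu
    · split at h
      · split at h
        · cases h
        · cases h; exact PySem.Dict.get?_insert_self _ _ _
      · split at h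
        · cases h
        · split at h
          · cases h
          · cases h; exact PySem.Dict.get?_insert_self _ _ _

theorem pvFoldA_vals (tokens : List String) (n : Int) (C : PySem.Dict Int (List Int)) (f : Nat) :
    ∀ (kids : List Int) (κ : PySem.Dict Int pvVal) (infos : List pvVal)
      (κ₂ : PySem.Dict Int pvVal) (infos₂ : List pvVal),
      kids.foldlM (pvFA tokens n C f) (κ, infos) = some (κ₂, infos₂) →
      ∃ vals, infos₂ = infos ++ vals ∧
        List.Forall₂ (fun c x => κ₂.get? c = some x) kids vals := by
  intro kids
  induction kids with
  | nil =>
    intro κ infos κ₂ infos₂ h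
    simp at h
    exact ⟨[], by simp [← h.2], by rw [← h.1]; exact List.Forall₂.nil⟩
  | cons c kids ih =>
    intro κ infos κ₂ infos₂ h
    rw [List.foldlM_cons] at h
    rcases hc : pvVisitA tokens n C f κ c with _ | r
    · rw [pvFA, hc] at h; simp at h
    · have hstep : pvFA tokens n C f (κ, infos) c = some (r.1, infos ++ [r.2]) := by
        rw [pvFA, hc]; rfl
      rw [hstep] at h
      replace h : kids.foldlM (pvFA tokens n C f) (r.1, infos ++ [r.2]) = some (κ₂, infos₂) := h
      obtain ⟨vals, hv, hfa⟩ := ih r.1 (infos ++ [r.2]) κ₂ infos₂ h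
      refine ⟨r.2 :: vals, by simp [hv], List.Forall₂.cons ?_ hfa⟩
      exact pvFoldA_grow tokens n C f kids r.1 _ (κ₂, infos₂) h c r.2
        (pvVisitA_get_self (by rw [hc]))

theorem pvFoldA_allhit (tokens : List String) (n : Int) (C : PySem.Dict Int (List Int)) (f : Nat) :
    ∀ (kids : List Int) (κ : PySem.Dict Int pvVal) (infos : List pvVal)
      (κ₂ : PySem.Dict Int pvVal) (infos₂ : List pvVal),
      (∀ c ∈ kids, (κ.get? c).isSome) →
      kids.foldlM (pvFA tokens n C f) (κ, infos) = some (κ₂, infos₂) →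
      κ₂ = κ := by
  intro kids
  induction kids with
  | nil => intro κ infos κ₂ infos₂ _ h; simp at h; exact h.1.symm
  | cons c kids ih =>
    intro κ infos κ₂ infos₂ hall h
    rw [List.foldlM_cons] at h
    rcases hu : κ.get? c with _ | u
    · have := hall c (by simp); rw [hu] at this; simp at this
    · rcases f with _ | f
      · rw [pvFA] at h; simp [pvVisitA] at h
      · have hc : pvVisitA tokens n C (f+1) κ c = some (κ, u) := by
          rw [pvVisitA_succ, hu]
        have hstep : pvFA tokens n C (f+1) (κ, infos) c = some (κ, infos ++ [u]) := by
          rw [pvFA, hc]; rfl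
        rw [hstep] at h
        replace h : kids.foldlM (pvFA tokens n C (f+1)) (κ, infos ++ [u]) = some (κ₂, infos₂) := h
        exact ih κ _ κ₂ infos₂ (fun d hd => hall d (by simp [hd])) h

-- keys newly cached by a fold over children all satisfy Q, given each child's run does
theorem pvFoldA_new (tokens : List String) (n : Int) (C : PySem.Dict Int (List Int)) (f : Nat)
    (Q : Int → Prop) :
    ∀ (kids : List Int),
      (∀ c ∈ kids, ∀ (κ κ' : PySem.Dict Int pvVal) (val : pvVal),
        pvVisitA tokens n C f κ c = some (κ', val) →
        ∀ u, κ.get? u = none → (κ'.get? u).isSome → Q u) →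
      ∀ (κ : PySem.Dict Int pvVal) (infos : List pvVal)
        (acc2 : PySem.Dict Int pvVal × List pvVal),
        kids.foldlM (pvFA tokens n C f) (κ, infos) = some acc2 →
        ∀ u, κ.get? u = none → (acc2.1.get? u).isSome → Q u := by
  intro kids
  induction kids with
  | nil => intro _ κ infos acc2 h u hnone hsome; simp at h; rw [← h] at hsome; rw [hnone] at hsome; simp at hsome
  | cons c kids ih =>
    intro H κ infos acc2 h u hnone hsome
    rw [List.foldlM_cons] at h
    rcases hc : pvVisitA tokens n C f κ c with _ | r
    · rw [pvFA, hc] at h; simp at h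
    · have hstep : pvFA tokens n C f (κ, infos) c = some (r.1, infos ++ [r.2]) := by
        rw [pvFA, hc]; rfl
      rw [hstep] at h
      replace h : kids.foldlM (pvFA tokens n C f) (r.1, infos ++ [r.2]) = some acc2 := h
      rcases h1 : r.1.get? u with _ | w
      · exact ih (fun d hd => H d (by simp [hd])) r.1 _ acc2 h u h1 hsome
      · exact H c (by simp) κ r.1 r.2 (by rw [hc]) u hnone (by rw [h1]; rfl)


-- every key newly cached by visit(v) is a leaf or has parent-chain rank ≥ rank v
theorem pvVisitA_new (tokens : List String) (parents : List Int) (n : Int)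
    (hPre3 : ∀ j ∈ PySem.List.pyRange (n + 1) ((parents.length : Int) + 1),
      pvInternal n (parents.length : Int) ((pvStep parents n)^[parents.length] j) = false) :
    ∀ (f : Nat) (κ : PySem.Dict Int pvVal) (v : Int) (κ' : PySem.Dict Int pvVal) (val : pvVal),
      1 ≤ v → v ≤ (parents.length : Int) →
      pvVisitA tokens n (pvBuild parents).1 f κ v = some (κ', val) →
      ∀ u, κ.get? u = none → (κ'.get? u).isSome →
      u ≤ n ∨ (n < u ∧ n < v ∧ pvRank parents n v ≤ pvRank parents n u) := by
  intro f
  induction f with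
  | zero => intro κ v κ' val _ _ h; simp [pvVisitA] at h
  | succ f ih =>
    intro κ v κ' val h1 hm h u hnone hsome
    rw [pvVisitA_succ] at h
    split at h
    · cases h; rw [hnone] at hsome; simp at hsome
    · next hu =>
      split at h
      · next hv =>
        split at h
        · cases h
        · cases h
          rw [PySem.Dict.get?_insert] at hsome
          split at hsome
          · next he => subst he; exact Or.inl hv
          · rw [hnone] at hsome; simp at hsome
      · next hv =>
        split at h
        · cases h
        · next acc hacc =>
          split at h
          · cases h
          · cases h
            have hvn : n < v := by omega
            have hvI : pvInternal n (parents.length : Int) v = true := by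
              simp [pvInternal]; omega
            rw [PySem.Dict.get?_insert] at hsome
            split at hsome
            · next he =>
              subst he
              exact Or.inr ⟨hvn, hvn, le_refl _⟩
            · refine pvFoldA_new tokens n (pvBuild parents).1 f
                (fun u => u ≤ n ∨ (n < u ∧ n < v ∧ pvRank parents n v ≤ pvRank parents n u))
                _ ?_ κ [] acc hacc u hnone hsome
              intro c hcmem κ0 κ0' val0 hc0 u0 h0none h0some
              obtain ⟨hc1, hcm, -, -⟩ := pvChild_mem hcmem
              rcases ih κ0 c κ0' val0 hc1 hcm hc0 u0 h0none h0some with h' | ⟨hnu, hnc, hrk⟩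
              · exact Or.inl h'
              · have := pvChildRank parents n hPre3 hvI hcmem hnc
                exact Or.inr ⟨hnu, hvn, by omega⟩

-- A's visit returns under Pre_ (fuel |parents|+2 suffices)
theorem pvVisitA_isSome (tokens : List String) (parents : List Int)
    (hPre2 : ∀ j ∈ PySem.List.pyRange ((tokens.length : Int) + 1) ((parents.length : Int) + 1), j ∈ parents)
    (hPre3 : ∀ j ∈ PySem.List.pyRange ((tokens.length : Int) + 1) ((parents.length : Int) + 1),
      pvInternal (tokens.length : Int) (parents.length : Int)
        ((pvStep parents (tokens.length : Int))^[parents.length] j) = false) :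
    ∀ (fuel : Nat) (v : Int) (κ : PySem.Dict Int pvVal),
      1 ≤ v → v ≤ (parents.length : Int) →
      ((tokens.length : Int) < v →
        parents.length + 2 - pvRank parents (tokens.length : Int) v ≤ fuel) →
      1 ≤ fuel →
      (pvVisitA tokens (tokens.length : Int) (pvBuild parents).1 fuel κ v).isSome := by
  intro fuel
  induction fuel with
  | zero => intro v κ h1 hm hr h0; omega
  | succ f ih =>
    intro v κ h1 hm hr h0
    rw [pvVisitA_succ]
    rcases hu : κ.get? v with _ | u
    · by_cases hv : v ≤ (tokens.length : Int)
      · obtain ⟨t, ht⟩ := pvLeafGet tokens h1 hv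
        simp [hv, ht]
      · have hvn : (tokens.length : Int) < v := by omega
        have hvI : pvInternal (tokens.length : Int) (parents.length : Int) v = true := by
          simp [pvInternal]; omega
        have hrle := pvRank_le parents (tokens.length : Int) hPre3 hvI
        have hfold := pvFoldlM_isSome
          (pvFA tokens (tokens.length : Int) (pvBuild parents).1 f)
          (((pvBuild parents).1).getD v []) ?_ (κ, [])
        · rcases hres : (((pvBuild parents).1).getD v []).foldlM
              (pvFA tokens (tokens.length : Int) (pvBuild parents).1 f) (κ, []) with _ | acc
          · rw [hres] at hfold; simp at hfold
          · obtain ⟨vals, hveq, hfa⟩ := pvFoldA_vals tokens (tokens.length : Int)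
              (pvBuild parents).1 f _ κ [] acc.1 acc.2 (by rw [hres])
            have hne : ((pvBuild parents).1).getD v [] ≠ [] := by
              refine pvChild_ne_nil (by omega) ?_
              exact hPre2 v (PySem.List.mem_pyRange_one.mpr ⟨by omega, by omega⟩)
            have hvals_ne : acc.2 ≠ [] := by
              intro hnil
              rw [hnil] at hveq
              simp at hveq
              rw [hveq] at hfa
              exact hne (List.eq_nil_of_length_eq_zero (by simpa using hfa.length_eq))
            have hsne : PySem.List.sorted acc.2 (fun x => x.1) false ≠ [] := by
              rw [Ne, PySem.List.sorted_eq_nil_iff]; exact hvals_ne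
            rcases hs : PySem.List.sorted acc.2 (fun x => x.1) false with _ | ⟨i0, restI⟩
            · exact absurd hs hsne
            · simp [hv, hres, hs, PySem.List.pyGet?_zero]
        · intro c hcmem s
          obtain ⟨hc1, hcm, -, -⟩ := pvChild_mem hcmem
          have : (pvVisitA tokens (tokens.length : Int) (pvBuild parents).1 f s.1 c).isSome := by
            refine ih c s.1 hc1 hcm ?_ (by have := hr hvn; omega)
            intro hcn
            rw [pvChildRank parents (tokens.length : Int) hPre3 hvI hcmem hcn]
            have := hr hvn
            omega
          rw [pvFA]
          rcases hvr : pvVisitA tokens (tokens.length : Int) (pvBuild parents).1 f s.1 c with _ | r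
          · rw [hvr] at this; simp at this
          · simp [hvr]
    · simp


theorem pvForall₂_mem_left {α β : Type} {P : α → β → Prop} {l : List α} {ys : List β}
    (h : List.Forall₂ P l ys) {c : α} (hc : c ∈ l) : ∃ x, P c x := by
  induction h with
  | nil => cases hc
  | cons hP _ ih =>
    rcases List.mem_cons.mp hc with rfl | hc'
    · exact ⟨_, hP⟩
    · exact ih hc'

-- evaluation lemmas for one iteration of B's loop body
theorem pvStepB_hit {tokens : List String} {n : Int} {C : PySem.Dict Int (List Int)}
    {κ : PySem.Dict Int pvVal} {v : Int} {rest : List Int} (h : κ.contains v = true) :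
    pvStepB tokens n C (κ, v :: rest) = some (κ, rest) := by
  rw [pvStepB]; simp [h]

theorem pvStepB_leaf {tokens : List String} {n : Int} {C : PySem.Dict Int (List Int)}
    {κ : PySem.Dict Int pvVal} {v : Int} {rest : List Int} {t : String}
    (h : κ.contains v = false) (hv : v ≤ n) (ht : PySem.List.pyGet? tokens (v - 1) = some t) :
    pvStepB tokens n C (κ, v :: rest) = some (κ.insert v (v, [t], [pvNorm t]), rest) := by
  rw [pvStepB]; simp [h, hv, ht]

theorem pvStepB_push {tokens : List String} {n : Int} {C : PySem.Dict Int (List Int)}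
    {κ : PySem.Dict Int pvVal} {v : Int} {rest : List Int}
    (h : κ.contains v = false) (hv : ¬ v ≤ n)
    (hp : (C.getD v []).filter (fun c => !(κ.contains c)) ≠ []) :
    pvStepB tokens n C (κ, v :: rest) =
      some (κ, (C.getD v []).filter (fun c => !(κ.contains c)) ++ v :: rest) := by
  rw [pvStepB]; simp [h, hv, hp]

theorem pvStepB_combine {tokens : List String} {n : Int} {C : PySem.Dict Int (List Int)}
    {κ : PySem.Dict Int pvVal} {v : Int} {rest : List Int} {vals : List pvVal}
    {h0 : pvVal} {restI : List pvVal}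
    (h : κ.contains v = false) (hv : ¬ v ≤ n)
    (hp : (C.getD v []).filter (fun c => !(κ.contains c)) = [])
    (hmapM : (C.getD v []).mapM κ.get? = some vals)
    (hs : PySem.List.sorted vals (fun x => x.1) false = h0 :: restI) :
    pvStepB tokens n C (κ, v :: rest) =
      some (κ.insert v (h0.1, (h0 :: restI).flatMap (fun x => x.2.1),
        (h0 :: restI).flatMap (fun x => x.2.2)), rest) := by
  rw [pvStepB]; simp [h, hv, hp, hmapM, hs]

-- one child-fold of A simulated by B popping the pending children
theorem pvSimFold (tokens : List String) (parents : List Int) (n : Int) (f : Nat) (Bf : Nat)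
    (HS : ∀ (κ : PySem.Dict Int pvVal) (v : Int) (κ' : PySem.Dict Int pvVal) (val : pvVal),
      1 ≤ v → v ≤ (parents.length : Int) →
      pvVisitA tokens n (pvBuild parents).1 f κ v = some (κ', val) →
      ∀ rest, ∃ k, k ≤ Bf ∧
        pvIter tokens n (pvBuild parents).1 k (κ, v :: rest) = some (κ', rest)) :
    ∀ (l kids : List Int) (κ : PySem.Dict Int pvVal) (infos : List pvVal)
      (κ₂ : PySem.Dict Int pvVal) (infos₂ : List pvVal) (rest : List Int),
      (∀ c ∈ kids, 1 ≤ c ∧ c ≤ (parents.length : Int)) →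
      kids.foldlM (pvFA tokens n (pvBuild parents).1 f) (κ, infos) = some (κ₂, infos₂) →
      l.filter (fun c => !(κ.contains c)) = kids.filter (fun c => !(κ.contains c)) →
      ∃ k, k ≤ l.length + kids.length * Bf ∧
        pvIter tokens n (pvBuild parents).1 k (κ, l ++ rest) = some (κ₂, rest) := by
  intro l
  induction l with
  | nil =>
    intro kids κ infos κ₂ infos₂ rest hbnd hfold hfil
    have hnil : kids.filter (fun c => !(κ.contains c)) = [] := by rw [← hfil]; simp
    have hall : ∀ c ∈ kids, (κ.get? c).isSome := by
      intro c hc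
      rw [← PySem.Dict.contains_eq_isSome_get?]
      by_contra hfalse
      have hcf : (!(κ.contains c)) = true := by
        cases hx : κ.contains c
        · rfl
        · exact absurd hx hfalse
      have : c ∈ kids.filter (fun c => !(κ.contains c)) := List.mem_filter.mpr ⟨hc, hcf⟩
      rw [hnil] at this
      cases this
    have hk2 := pvFoldA_allhit tokens n (pvBuild parents).1 f kids κ infos κ₂ infos₂ hall hfold
    exact ⟨0, by omega, by rw [hk2]; rfl⟩
  | cons c l ih =>
    intro kids κ infos κ₂ infos₂ rest hbnd hfold hfil
    rcases hc : κ.contains c with _ | _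
    · -- c uncached: real work
      have hfil2 : kids.filter (fun d => !(κ.contains d)) = c :: l.filter (fun d => !(κ.contains d)) := by
        rw [← hfil, List.filter_cons]
        simp [hc]
      obtain ⟨kids₀, kids₁, hkeq, hk0, -, hk1⟩ := List.filter_eq_cons_iff.mp hfil2
      subst hkeq
      rw [List.foldlM_append] at hfold
      rcases hf0 : kids₀.foldlM (pvFA tokens n (pvBuild parents).1 f) (κ, infos) with _ | acc0
      · rw [hf0] at hfold; cases hfold
      · rw [hf0] at hfold
        rcases acc0 with ⟨κ0, infos0⟩
        replace hfold : (c :: kids₁).foldlM (pvFA tokens n (pvBuild parents).1 f) (κ0, infos0) = some (κ₂, infos₂) := hfold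
        have hall0 : ∀ d ∈ kids₀, (κ.get? d).isSome := by
          intro d hd
          have := hk0 d hd
          rw [← PySem.Dict.contains_eq_isSome_get?]
          cases hx : κ.contains d
          · exact absurd (by rw [hx]; rfl) this
          · rfl
        have hκ0 : κ0 = κ :=
          pvFoldA_allhit tokens n (pvBuild parents).1 f kids₀ κ infos κ0 infos0 hall0 hf0
        rw [hκ0] at hfold
        rw [List.foldlM_cons] at hfold
        rcases hvc : pvVisitA tokens n (pvBuild parents).1 f κ c with _ | r
        · rw [pvFA, hvc] at hfold; cases hfold
        · rcases r with ⟨κ₁, v₁⟩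
          have hstep : pvFA tokens n (pvBuild parents).1 f (κ, infos0) c = some (κ₁, infos0 ++ [v₁]) := by
            rw [pvFA, hvc]; rfl
          rw [hstep] at hfold
          replace hfold : kids₁.foldlM (pvFA tokens n (pvBuild parents).1 f) (κ₁, infos0 ++ [v₁]) = some (κ₂, infos₂) := hfold
          have hbc := hbnd c (by simp)
          obtain ⟨k₁, hbk₁, hit₁⟩ := HS κ c κ₁ v₁ hbc.1 hbc.2 hvc (l ++ rest)
          have hgrowc : ∀ x, κ.contains x = true → κ₁.contains x = true := by
            intro x hx
            rw [PySem.Dict.contains_eq_isSome_get?] at hx ⊢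
            rcases hgx : κ.get? x with _ | w
            · rw [hgx] at hx; cases hx
            · rw [pvVisitA_grow tokens n (pvBuild parents).1 f κ c κ₁ v₁ hvc x w hgx]; rfl
          have key : ∀ (xs : List Int), xs.filter (fun d => !(κ₁.contains d)) =
              (xs.filter (fun d => !(κ.contains d))).filter (fun d => !(κ₁.contains d)) := by
            intro xs
            rw [List.filter_filter]
            apply List.filter_congr
            intro x _
            cases h1 : (!(κ₁.contains x))
            · simp
            · have : (!(κ.contains x)) = true := by
                cases hcx : κ.contains x
                · rfl
                · rw [hgrowc x hcx] at h1; cases h1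
              simp [this]
          have hfil₁ : l.filter (fun d => !(κ₁.contains d)) = kids₁.filter (fun d => !(κ₁.contains d)) := by
            rw [key l, key kids₁, hk1]
          obtain ⟨k₂, hbk₂, hit₂⟩ := ih kids₁ κ₁ (infos0 ++ [v₁]) κ₂ infos₂ rest
            (fun d hd => hbnd d (by simp [hd])) hfold hfil₁
          refine ⟨k₁ + k₂, ?_, pvIter_trans hit₁ hit₂⟩
          have hlen : kids₁.length + 1 ≤ (kids₀ ++ c :: kids₁).length := by
            simp [List.length_append]
          have hmul := Nat.mul_le_mul_right Bf hlen
          have : k₁ + k₂ ≤ Bf + (l.length + kids₁.length * Bf) := by omega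
          calc k₁ + k₂ ≤ Bf + (l.length + kids₁.length * Bf) := this
            _ = l.length + (kids₁.length + 1) * Bf := by ring
            _ ≤ l.length + (kids₀ ++ c :: kids₁).length * Bf := by
                exact Nat.add_le_add_left hmul _
            _ ≤ (c :: l).length + (kids₀ ++ c :: kids₁).length * Bf := by simp
    · -- c already cached: skip step
      have hstep := pvStepB_hit (tokens := tokens) (n := n) (C := (pvBuild parents).1)
        (κ := κ) (v := c) (rest := l ++ rest) hc
      have hfil' : l.filter (fun d => !(κ.contains d)) = kids.filter (fun d => !(κ.contains d)) := by
        rw [← hfil, List.filter_cons]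
        simp [hc]
      obtain ⟨k, hk, hit⟩ := ih kids κ infos κ₂ infos₂ rest hbnd hfold hfil'
      exact ⟨1 + k, by simp; omega, pvIter_trans (pvIter_one hstep) hit⟩


-- main simulation: one visit(v) of A = a bounded run of B's loop body popping v
theorem pvSim (tokens : List String) (parents : List Int) (n : Int)
    (hPre3 : ∀ j ∈ PySem.List.pyRange (n + 1) ((parents.length : Int) + 1),
      pvInternal n (parents.length : Int) ((pvStep parents n)^[parents.length] j) = false) :
    ∀ (f : Nat) (κ : PySem.Dict Int pvVal) (v : Int) (κ' : PySem.Dict Int pvVal) (val : pvVal),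
      1 ≤ v → v ≤ (parents.length : Int) →
      pvVisitA tokens n (pvBuild parents).1 f κ v = some (κ', val) →
      ∀ rest, ∃ k, k ≤ (parents.length + 2)^f ∧
        pvIter tokens n (pvBuild parents).1 k (κ, v :: rest) = some (κ', rest) := by
  intro f
  induction f with
  | zero => intro κ v κ' val _ _ h; simp [pvVisitA] at h
  | succ f ih =>
    intro κ v κ' val h1 hm h rest
    have hpow1 : 1 ≤ (parents.length + 2)^(f+1) := Nat.one_le_pow _ _ (by omega)
    rw [pvVisitA_succ] at h
    split at h
    · next u hu =>
      cases h
      have hc : κ.contains v = true := by rw [PySem.Dict.contains_eq_isSome_get?, hu]; rfl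
      exact ⟨1, hpow1, pvIter_one (pvStepB_hit hc)⟩
    · next hu =>
      have hcf : κ.contains v = false := by rw [PySem.Dict.contains_eq_isSome_get?, hu]; rfl
      split at h
      · next hv =>
        split at h
        · cases h
        · next t ht =>
          cases h
          exact ⟨1, hpow1, pvIter_one (pvStepB_leaf hcf hv ht)⟩
      · next hv =>
        split at h
        · cases h
        · next acc hacc =>
          rcases acc with ⟨κ₂, vals⟩
          split at h
          · cases h
          · next hd hhd =>
            rcases hs : PySem.List.sorted vals (fun x => x.1) false with _ | ⟨s0, srest⟩
            · rw [hs] at hhd; simp [PySem.List.pyGet?] at hhd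
            · rw [hs] at hhd
              rw [PySem.List.pyGet?_zero] at hhd
              have hds : s0 = hd := Option.some.inj hhd
              subst hds
              cases h
              obtain ⟨vals', hveq, hfa⟩ := pvFoldA_vals tokens n (pvBuild parents).1 f _ κ [] κ₂ vals hacc
              simp only [List.nil_append] at hveq
              subst hveq
              have hrn : ((s0 :: srest).foldl (fun (rn : List String × List String) x =>
                  (rn.1 ++ x.2.1, rn.2 ++ x.2.2)) ([], [])) =
                  ((s0 :: srest).flatMap (fun x => x.2.1), (s0 :: srest).flatMap (fun x => x.2.2)) := by
                rw [PySem.List.foldl_prod_mk (f := fun (a : List String) (x : pvVal) => a ++ x.2.1)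
                  (g := fun (a : List String) (x : pvVal) => a ++ x.2.2)]
                rw [PySem.List.foldl_append_eq_flatMap, PySem.List.foldl_append_eq_flatMap]
                simp
              rw [hs, hrn]
              have hmapM2 : ((pvBuild parents).1.getD v []).mapM κ₂.get? = some vals :=
                pvMapM_of_forall₂ hfa
              by_cases hp : ((pvBuild parents).1.getD v []).filter (fun c => !(κ.contains c)) = []
              · -- all children already cached: one combine step
                have hall : ∀ c ∈ (pvBuild parents).1.getD v [], (κ.get? c).isSome := by
                  intro c hcm
                  rw [← PySem.Dict.contains_eq_isSome_get?]
                  by_contra hfalse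
                  have hcf2 : (!(κ.contains c)) = true := by
                    cases hx : κ.contains c
                    · rfl
                    · exact absurd hx hfalse
                  have : c ∈ ((pvBuild parents).1.getD v []).filter (fun c => !(κ.contains c)) :=
                    List.mem_filter.mpr ⟨hcm, hcf2⟩
                  rw [hp] at this; cases this
                have hκ2 : κ₂ = κ := pvFoldA_allhit tokens n (pvBuild parents).1 f _ κ [] κ₂ vals hall hacc
                subst hκ2
                exact ⟨1, hpow1, pvIter_one (pvStepB_combine hcf hv hp hmapM2 hs)⟩
              · -- push pending, run them, then combine
                have hstep1 := pvStepB_push (tokens := tokens) (n := n) (C := (pvBuild parents).1)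
                  (κ := κ) (v := v) (rest := rest) hcf hv hp
                have hbndk : ∀ c ∈ (pvBuild parents).1.getD v [], 1 ≤ c ∧ c ≤ (parents.length : Int) := by
                  intro c hcm
                  obtain ⟨a, b, -, -⟩ := pvChild_mem hcm
                  exact ⟨a, b⟩
                have hfilp : (((pvBuild parents).1.getD v []).filter (fun c => !(κ.contains c))).filter (fun c => !(κ.contains c)) =
                    ((pvBuild parents).1.getD v []).filter (fun c => !(κ.contains c)) := by
                  rw [List.filter_filter]
                  apply List.filter_congr
                  intro x _
                  cases hx : (!(κ.contains x)) <;> simp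
                obtain ⟨k₂, hbk₂, hit₂⟩ := pvSimFold tokens parents n f ((parents.length + 2)^f)
                  (fun κa va κa' vala ha1 ham ha => ih κa va κa' vala ha1 ham ha)
                  (((pvBuild parents).1.getD v []).filter (fun c => !(κ.contains c)))
                  ((pvBuild parents).1.getD v []) κ [] κ₂ vals (v :: rest) hbndk hacc hfilp
                -- after the fold v is still uncached
                have hvn : n < v := by omega
                have hvnew : κ₂.get? v = none := by
                  rcases hgv : κ₂.get? v with _ | w
                  · rfl
                  · exfalso
                    have hQ := pvFoldA_new tokens n (pvBuild parents).1 f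
                      (fun u => u ≤ n ∨ (n < u ∧ pvRank parents n v + 1 ≤ pvRank parents n u))
                      ((pvBuild parents).1.getD v []) ?_ κ [] (κ₂, vals) hacc v hu (by rw [hgv]; rfl)
                    · rcases hQ with h' | ⟨-, h'⟩
                      · omega
                      · omega
                    · intro c hcm κ0 κ0' val0 hc0 u0 h0none h0some
                      obtain ⟨hc1, hcm2, -, -⟩ := pvChild_mem hcm
                      have hvI : pvInternal n (parents.length : Int) v = true := by
                        simp [pvInternal]; omega
                      rcases pvVisitA_new tokens parents n hPre3 f κ0 c κ0' val0 hc1 hcm2 hc0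
                          u0 h0none h0some with h' | ⟨hnu, hnc, hrk⟩
                      · exact Or.inl h'
                      · have := pvChildRank parents n hPre3 hvI hcm hnc
                        exact Or.inr ⟨hnu, by omega⟩
                have hc2f : κ₂.contains v = false := by
                  rw [PySem.Dict.contains_eq_isSome_get?, hvnew]; rfl
                have hpend2 : ((pvBuild parents).1.getD v []).filter (fun c => !(κ₂.contains c)) = [] := by
                  rw [List.filter_eq_nil_iff]
                  intro c hcm
                  obtain ⟨x, hx⟩ := pvForall₂_mem_left hfa hcm
                  have : κ₂.contains c = true := by
                    rw [PySem.Dict.contains_eq_isSome_get?, hx]; rfl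
                  simp [this]
                have hstep3 := pvStepB_combine (tokens := tokens) (n := n)
                  (C := (pvBuild parents).1) (rest := rest) hc2f hv hpend2 hmapM2 hs
                refine ⟨1 + k₂ + 1, ?_, ?_⟩
                · -- arithmetic bound
                  have hkne : (pvBuild parents).1.getD v [] ≠ [] := by
                    intro he; rw [he] at hp; exact hp rfl
                  have hf1 : 1 ≤ f := by
                    rcases hfz : f with _ | f'
                    · exfalso
                      rcases hke : (pvBuild parents).1.getD v [] with _ | ⟨c0, ks⟩
                      · exact hkne hke
                      · rw [hfz, hke, List.foldlM_cons, pvFA] at hacc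
                        simp [pvVisitA] at hacc
                    · omega
                  have hkl : ((pvBuild parents).1.getD v []).length ≤ parents.length :=
                    pvKids_len parents v
                  have hpl : (((pvBuild parents).1.getD v []).filter (fun c => !(κ.contains c))).length ≤
                      ((pvBuild parents).1.getD v []).length := List.length_filter_le _ _
                  have hQp : parents.length + 2 ≤ (parents.length + 2)^f :=
                    Nat.le_self_pow (by omega) _
                  have hb1 : 1 + k₂ + 1 ≤ 2 + (parents.length + parents.length * ((parents.length + 2)^f)) := by
                    have := Nat.mul_le_mul_right ((parents.length + 2)^f) hkl
                    omega
                  calc 1 + k₂ + 1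
                      ≤ (2 + parents.length) + parents.length * ((parents.length + 2)^f) := by omega
                    _ ≤ 2 * ((parents.length + 2)^f) + parents.length * ((parents.length + 2)^f) := by
                        exact Nat.add_le_add_right (by omega) _
                    _ = (parents.length + 2) * ((parents.length + 2)^f) := by ring
                    _ = (parents.length + 2)^(f+1) := by rw [pow_succ]; ring
                · exact pvIter_trans (pvIter_trans (pvIter_one hstep1) hit₂) (pvIter_one hstep3)


-- both top-level loops over the start nodes produce the same final cache
theorem pvTop (tokens : List String) (parents : List Int)
    (hPre2 : ∀ j ∈ PySem.List.pyRange ((tokens.length : Int) + 1) ((parents.length : Int) + 1), j ∈ parents)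
    (hPre3 : ∀ j ∈ PySem.List.pyRange ((tokens.length : Int) + 1) ((parents.length : Int) + 1),
      pvInternal (tokens.length : Int) (parents.length : Int)
        ((pvStep parents (tokens.length : Int))^[parents.length] j) = false) :
    ∀ (starts : List Int), (∀ s ∈ starts, 1 ≤ s ∧ s ≤ (parents.length : Int)) →
    ∀ (κ : PySem.Dict Int pvVal), ∃ κF,
      starts.foldlM (fun cache v =>
        (pvVisitA tokens (tokens.length : Int) (pvBuild parents).1 (parents.length + 2) cache v).map (·.1)) κ = some κF ∧
      starts.foldlM (fun cache s =>
        pvLoopB tokens (tokens.length : Int) (pvBuild parents).1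
          ((parents.length + 2)^(parents.length + 2)) (cache, [s])) κ = some κF := by
  intro starts
  induction starts with
  | nil => intro _ κ; exact ⟨κ, by simp, by simp⟩
  | cons s starts ih =>
    intro hbnd κ
    obtain ⟨hs1, hsm⟩ := hbnd s (by simp)
    have hsome := pvVisitA_isSome tokens parents hPre2 hPre3 (parents.length + 2) s κ hs1 hsm
      (fun _ => by omega) (by omega)
    rcases hv : pvVisitA tokens (tokens.length : Int) (pvBuild parents).1 (parents.length + 2) κ s
        with _ | r
    · rw [hv] at hsome; simp at hsome
    · rcases r with ⟨κ', val⟩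
      obtain ⟨k, hk, hit⟩ := pvSim tokens parents (tokens.length : Int) hPre3 (parents.length + 2)
        κ s κ' val hs1 hsm hv []
      have hloop : pvLoopB tokens (tokens.length : Int) (pvBuild parents).1
          ((parents.length + 2)^(parents.length + 2)) (κ, [s]) = some κ' :=
        pvLoop_of_iter k (κ, [s]) κ' hit _ hk
      obtain ⟨κF, hA, hB⟩ := ih (fun q hq => hbnd q (by simp [hq])) κ'
      refine ⟨κF, ?_, ?_⟩
      · rw [List.foldlM_cons, hv]
        exact hA
      · rw [List.foldlM_cons, hloop]
        exact hB

-- ===== VERDICT (by name: the statement is the Claim_ definition above) =====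
theorem extract_node_tokens_spec : Claim_equal_extract_node_tokens := by
  intro tokens parents hDom hPre
  obtain ⟨hP1, hP2, hP3⟩ := hPre
  unfold Spec_extract_node_tokens
  obtain ⟨r, hr⟩ := pvRoot_some hP1
  obtain ⟨κF, hA, hB⟩ := pvTop tokens parents hP2 hP3
    (PySem.List.pyRange 1 ((parents.length : Int) + 1))
    (fun s hs => by
      rw [PySem.List.mem_pyRange_one] at hs
      exact ⟨hs.1, by omega⟩)
    PySem.Dict.empty
  show (extract_node_tokens tokens parents) = (extract_node_tokens_alt tokens parents)
  unfold extract_node_tokens extract_node_tokens_alt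
  simp only [hr, hA, hB]
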